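-- pv_equiv track=rewrite | github.com/TristanDonze/Pagerank-Implementation | main.py | removeDeadEnds
-- ===== SOURCE A (Python) =====
-- def removeDeadEnds(webGraph: dict) -> dict:
--     """
--     Remove pages that don't link to any other page.
--     """
--     modifWebGraph = webGraph.copy()
--
--     while True:
--         deleted = False
--         pagesToDelete = []
--
--         for page, linkedPages in modifWebGraph.items():
--             if len(linkedPages) == 0:
--                 pagesToDelete.append(page)
--
--         if not pagesToDelete:
--             break
--
--         for page in pagesToDelete:
--             del modifWebGraph[page]
--             deleted = True
--
--             for page2, linkedPages2 in modifWebGraph.items():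
--                 modifWebGraph[page2] = [element for element in linkedPages2 if element != page]
--
--         if not deleted:
--             break
--
--     return modifWebGraph
-- ===== SOURCE B (Python) =====
-- def removeDeadEnds(webGraph: dict) -> dict:
--     """
--     Remove pages that don't link to any other page.
--     """
--     dead = set()
--     while True:
--         newlyDead = [page for page, links in webGraph.items()
--                      if page not in dead and all(link in dead for link in links)]
--         if not newlyDead:
--             break
--         dead.update(newlyDead)
--     return {page: [link for link in links if link not in dead]
--             for page, links in webGraph.items() if page not in dead}
-- ===== Notes on version B (the rewrite author's own statement) =====
-- stated objective: alternative
-- what changed: Instead of deleting empty pages one at a time from a copied dict and rewriting every remaining link list after each single deletion, B computes the set of dead pages by fixpoint rounds over the untouched input graph and rebuilds the dict once at the end with a single filtered comprehension.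
import Mathlib
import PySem

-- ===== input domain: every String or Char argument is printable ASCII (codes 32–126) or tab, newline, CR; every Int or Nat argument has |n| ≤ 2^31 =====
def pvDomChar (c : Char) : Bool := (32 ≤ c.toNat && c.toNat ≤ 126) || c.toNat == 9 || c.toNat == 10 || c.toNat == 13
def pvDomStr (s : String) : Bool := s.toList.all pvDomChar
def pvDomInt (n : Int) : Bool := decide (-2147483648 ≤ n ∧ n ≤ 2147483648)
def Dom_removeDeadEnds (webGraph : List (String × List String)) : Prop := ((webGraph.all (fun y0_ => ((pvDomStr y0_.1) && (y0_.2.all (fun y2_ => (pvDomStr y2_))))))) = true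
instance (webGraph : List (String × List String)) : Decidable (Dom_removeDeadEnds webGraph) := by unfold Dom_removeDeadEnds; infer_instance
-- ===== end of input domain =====

-- B computes the set of dead pages by fixpoint rounds over the untouched graph and rebuilds the
-- dict once at the end, instead of A's one-page-at-a-time deletion that rewrites every link list
-- of the whole dict after each single deletion (objective: alternative — a different algorithm of
-- similar cost: it never mutates the graph and rebuilds it exactly once).

-- ===== PORT A =====
-- one pass of A's inner `for page in pagesToDelete` body: `del modifWebGraph[page]` followed by
-- the rewrite `modifWebGraph[page2] = [e for e in linkedPages2 if e != page]` of every entry.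
def pvStepA (d : PySem.Dict String (List String)) (page : String) : PySem.Dict String (List String) :=
  let d1 := d.erase page
  d1.items.foldl (fun m pr => m.insert pr.1 (pr.2.filter (fun element => element != page))) d1

-- A's `while True` loop.  fuel: every iteration with nonempty pagesToDelete deletes at least one
-- key, so `size + 1` iterations always suffice and the fuel-0 branch is never reached.
-- (`deleted` is True exactly when pagesToDelete is nonempty, so `if not deleted: break` never fires.)
def pvLoopA : Nat → PySem.Dict String (List String) → PySem.Dict String (List String)
  | 0, d => d
  | fuel+1, d =>
    let pagesToDelete := d.items.foldl (fun acc pr => if pr.2.length == 0 then acc ++ [pr.1] else acc) []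
    if pagesToDelete.isEmpty then d
    else pvLoopA fuel (pagesToDelete.foldl pvStepA d)

def removeDeadEnds (webGraph : List (String × List String)) : List (String × List String) :=
  (pvLoopA (webGraph.length + 1) (PySem.Dict.mk webGraph)).items

-- ===== PORT B =====
def pvNewlyDead (webGraph : List (String × List String)) (dead : PySem.Set String) : List String :=
  (webGraph.filter (fun pr => !PySem.Set.contains dead pr.1
      && pr.2.all (fun link => PySem.Set.contains dead link))).map Prod.fst

-- B's `while True` loop.  fuel: every round with nonempty newlyDead marks at least one further
-- key dead, so `length + 1` rounds always suffice and the fuel-0 branch is never reached.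
def pvDeadLoop : Nat → List (String × List String) → PySem.Set String → PySem.Set String
  | 0, _, dead => dead
  | fuel+1, webGraph, dead =>
    let newlyDead := pvNewlyDead webGraph dead
    if newlyDead.isEmpty then dead
    else pvDeadLoop fuel webGraph (PySem.Set.update dead newlyDead)

def removeDeadEnds_alt (webGraph : List (String × List String)) : List (String × List String) :=
  let dead := pvDeadLoop (webGraph.length + 1) webGraph PySem.Set.empty
  (webGraph.filter (fun pr => !PySem.Set.contains dead pr.1)).map
    (fun pr => (pr.1, pr.2.filter (fun link => !PySem.Set.contains dead link)))

-- ===== PRECONDITION & SPEC =====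
-- The Python argument is a dict, whose keys are necessarily distinct; Pre_ only excludes
-- association lists with a repeated key, which no Python dict can produce.
def Pre_removeDeadEnds (webGraph : List (String × List String)) : Prop :=
  (webGraph.map Prod.fst).Nodup
instance (webGraph : List (String × List String)) : Decidable (Pre_removeDeadEnds webGraph) := by
  unfold Pre_removeDeadEnds; infer_instance

def pvWitness_removeDeadEnds : (List (String × List String)) :=
  [("a", ["b", "z"]), ("b", []), ("c", ["b"])]

def Spec_removeDeadEnds (webGraph : List (String × List String)) (out : List (String × List String)) : Prop := out = removeDeadEnds_alt webGraph
instance (webGraph : List (String × List String)) (out : List (String × List String)) : Decidable (Spec_removeDeadEnds webGraph out) := by unfold Spec_removeDeadEnds; infer_instance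

-- ===== CLAIM (what is proved, stated in full; the proofs are below) =====
def Claim_equal_removeDeadEnds : Prop := ∀ (webGraph : List (String × List String)), Dom_removeDeadEnds webGraph → Pre_removeDeadEnds webGraph → Spec_removeDeadEnds webGraph (removeDeadEnds webGraph)

-- ===== LEMMAS AND PROOFS =====

-- the invariant shape of A's intermediate dict: the original graph with the pages of D removed
-- and every link into D filtered out
def pvFD (g : List (String × List String)) (D : List String) : List (String × List String) :=
  (g.filter (fun pr => !D.contains pr.1)).map
    (fun pr => (pr.1, pr.2.filter (fun l => !D.contains l)))

lemma pv_nodup_keys_pvFD (g : List (String × List String)) (D : List String)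
    (h : (g.map Prod.fst).Nodup) : ((pvFD g D).map Prod.fst).Nodup := by
  have he : (pvFD g D).map Prod.fst
      = (g.filter (fun pr => !D.contains pr.1)).map Prod.fst := by
    simp [pvFD, List.map_map, Function.comp]
  rw [he]
  exact h.sublist (List.Sublist.map Prod.fst List.filter_sublist)

lemma pv_rewrite_fold (v : String × List String → List String) :
    ∀ (T pre : List (String × List String)), ((pre ++ T).map Prod.fst).Nodup →
    T.foldl (fun m pr => m.insert pr.1 (v pr)) (PySem.Dict.mk (pre ++ T))
      = PySem.Dict.mk (pre ++ T.map (fun pr => (pr.1, v pr)))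
  | [], pre, _ => by simp
  | pr :: T', pre, h => by
    have hkeys : (pre ++ pr :: T').map Prod.fst
        = pre.map Prod.fst ++ pr.1 :: T'.map Prod.fst := by simp
    rw [hkeys] at h
    have hpre : pr.1 ∉ pre.map Prod.fst := by
      intro hm
      exact (List.disjoint_of_nodup_append h) hm (by simp)
    have hT' : pr.1 ∉ T'.map Prod.fst := by
      have := (List.Nodup.of_append_right h)
      rw [List.nodup_cons] at this
      exact this.1
    have hc : PySem.Dict.contains (PySem.Dict.mk (pre ++ pr :: T')) pr.1 = true := by
      simp only [PySem.Dict.contains, List.any_eq_true]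
      exact ⟨pr, by simp, by simp⟩
    rw [List.foldl_cons]
    have hins : (PySem.Dict.mk (pre ++ pr :: T')).insert pr.1 (v pr)
        = PySem.Dict.mk (pre ++ (pr.1, v pr) :: T') := by
      simp only [PySem.Dict.insert, hc, if_true]
      congr 1
      rw [List.map_append, List.map_cons]
      congr 1
      · rw [List.map_congr_left (g := id) (fun q hq => by
            have : q.1 ≠ pr.1 := by
              intro he'; exact hpre (he' ▸ List.mem_map_of_mem hq)
            simp [this]), List.map_id]
      · congr 1
        · simp
        · rw [List.map_congr_left (g := id) (fun q hq => by
              have : q.1 ≠ pr.1 := by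
                intro he'; exact hT' (he' ▸ List.mem_map_of_mem hq)
              simp [this]), List.map_id]
    rw [hins]
    have hre : pre ++ (pr.1, v pr) :: T' = (pre ++ [(pr.1, v pr)]) ++ T' := by simp
    rw [hre, pv_rewrite_fold v T' (pre ++ [(pr.1, v pr)]) (by simpa using h)]
    simp

lemma pv_stepA_items (S : List (String × List String)) (h : (S.map Prod.fst).Nodup) (p : String) :
    pvStepA (PySem.Dict.mk S) p
      = PySem.Dict.mk ((S.filter (fun pr => !(pr.1 == p))).map
          (fun pr => (pr.1, pr.2.filter (fun e => e != p)))) := by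
  simp only [pvStepA, PySem.Dict.erase]
  have hnd : (((S.filter (fun pr => !(pr.1 == p))).map Prod.fst)).Nodup :=
    h.sublist (List.Sublist.map Prod.fst List.filter_sublist)
  simpa using
    pv_rewrite_fold (fun pr => pr.2.filter (fun e => e != p))
      (S.filter (fun pr => !(pr.1 == p))) [] (by simpa using hnd)

lemma pv_contains_update (D N : List String) (x : String) :
    List.contains (PySem.Set.update D N) x = (List.contains D x || List.contains N x) := by
  rw [Bool.eq_iff_iff]
  simp [List.contains_eq_mem, PySem.Set.mem_update]

lemma pv_stepA_pvFD (g : List (String × List String)) (hg : (g.map Prod.fst).Nodup)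
    (D : List String) (p : String) :
    pvStepA (PySem.Dict.mk (pvFD g D)) p = PySem.Dict.mk (pvFD g (D ++ [p])) := by
  rw [pv_stepA_items _ (pv_nodup_keys_pvFD g D hg) p]
  congr 1
  unfold pvFD
  rw [List.filter_map, List.map_map, List.filter_filter]
  rw [List.filter_congr (q := fun pr => !List.contains (D ++ [p]) pr.1)
      (fun a _ => by
        rw [Bool.eq_iff_iff]
        simp [List.contains_eq_mem, List.mem_append]
        tauto)]
  apply List.map_congr_left
  intro a _
  simp only [Function.comp]
  refine Prod.ext rfl ?_
  rw [List.filter_filter]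
  exact List.filter_congr (fun e _ => by
    rw [Bool.eq_iff_iff]
    simp [List.contains_eq_mem, List.mem_append]
    tauto)

lemma pv_foldl_stepA (g : List (String × List String)) (hg : (g.map Prod.fst).Nodup) :
    ∀ (P : List String) (D : List String),
    P.foldl pvStepA (PySem.Dict.mk (pvFD g D)) = PySem.Dict.mk (pvFD g (D ++ P))
  | [], D => by simp
  | p :: P', D => by
    rw [List.foldl_cons, pv_stepA_pvFD g hg D p, pv_foldl_stepA g hg P' (D ++ [p])]
    simp

lemma pv_len_filter_zero (xs : List String) (D : List String) :
    ((xs.filter (fun l => !D.contains l)).length == 0) = xs.all (fun l => D.contains l) := by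
  rw [Bool.eq_iff_iff]
  simp [List.length_eq_zero_iff, List.filter_eq_nil_iff, List.all_eq_true]

lemma pv_pages_eq (g : List (String × List String)) (D : List String) :
    (pvFD g D).foldl (fun acc pr => if pr.2.length == 0 then acc ++ [pr.1] else acc) []
      = pvNewlyDead g D := by
  rw [PySem.List.foldl_append_if]
  simp only [List.nil_append]
  unfold pvFD pvNewlyDead
  rw [List.filter_map, List.map_map, List.filter_filter]
  rw [List.filter_congr
      (q := fun pr => !PySem.Set.contains D pr.1
        && pr.2.all (fun link => PySem.Set.contains D link))
      (fun a _ => by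
        simp only [Function.comp, PySem.Set.contains]
        rw [pv_len_filter_zero]
        exact Bool.and_comm _ _)]
  apply List.map_congr_left
  intro a _
  rfl

lemma pv_pvFD_congr (g : List (String × List String)) {D D' : List String}
    (h : ∀ x, D.contains x = D'.contains x) : pvFD g D = pvFD g D' := by
  unfold pvFD
  rw [List.filter_congr (fun a _ => by rw [h])]
  exact List.map_congr_left (fun a _ => by rw [List.filter_congr (fun l _ => by rw [h])])

lemma pv_measure_lt (g : List (String × List String)) (D : List String)
    (h : pvNewlyDead g D ≠ []) :
    ((g.map Prod.fst).filter
        (fun x => !List.contains (PySem.Set.update D (pvNewlyDead g D)) x)).length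
      < ((g.map Prod.fst).filter (fun x => !D.contains x)).length := by
  obtain ⟨p0, hp0⟩ := List.exists_mem_of_ne_nil _ h
  rw [pvNewlyDead] at hp0
  obtain ⟨pr, hmem, rfl⟩ := List.mem_map.1 hp0
  have hfg := List.mem_filter.1 hmem
  have hkey : pr.1 ∈ g.map Prod.fst := List.mem_map_of_mem hfg.1
  have hDfalse : List.contains D pr.1 = false := by
    have h2 := hfg.2
    rw [Bool.and_eq_true] at h2
    have := h2.1
    simpa [PySem.Set.contains] using this
  have hNmem : pr.1 ∈ pvNewlyDead g D := by
    rw [pvNewlyDead]; exact List.mem_map_of_mem hmem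
  have hsub : ((g.map Prod.fst).filter
        (fun x => !List.contains (PySem.Set.update D (pvNewlyDead g D)) x)).Sublist
      ((g.map Prod.fst).filter (fun x => !D.contains x)) := by
    apply List.monotone_filter_right
    intro a ha
    rw [pv_contains_update] at ha
    simp only [Bool.not_or, Bool.and_eq_true] at ha
    exact ha.1
  apply Nat.lt_of_le_of_ne hsub.length_le
  intro heq
  have hlist := hsub.eq_of_length heq
  have h1 : pr.1 ∈ (g.map Prod.fst).filter (fun x => !D.contains x) :=
    List.mem_filter.2 ⟨hkey, by simpa [List.contains_eq_mem] using hDfalse⟩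
  rw [← hlist] at h1
  have h2 := (List.mem_filter.1 h1).2
  rw [pv_contains_update] at h2
  simp [List.contains_eq_mem, hNmem] at h2

lemma pv_main (g : List (String × List String)) (hg : (g.map Prod.fst).Nodup) :
    ∀ (fuel : Nat) (D : List String),
    ((g.map Prod.fst).filter (fun x => !D.contains x)).length < fuel →
    (pvLoopA fuel (PySem.Dict.mk (pvFD g D))).items = pvFD g (pvDeadLoop fuel g D) := by
  intro fuel
  induction fuel with
  | zero => intro D h; omega
  | succ n ih =>
    intro D h
    simp only [pvLoopA, pvDeadLoop, pv_pages_eq]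
    by_cases hN : pvNewlyDead g D = []
    · simp [hN]
    · simp only [List.isEmpty_iff, hN, if_false]
      rw [pv_foldl_stepA g hg (pvNewlyDead g D) D,
        pv_pvFD_congr g (D := D ++ pvNewlyDead g D) (D' := PySem.Set.update D (pvNewlyDead g D))
          (fun x => by
          rw [show List.contains (PySem.Set.update D (pvNewlyDead g D)) x
              = (List.contains D x || List.contains (pvNewlyDead g D) x) from
            pv_contains_update D (pvNewlyDead g D) x]
          rw [Bool.eq_iff_iff]
          simp [List.contains_eq_mem, List.mem_append])]
      exact ih (PySem.Set.update D (pvNewlyDead g D))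
        (by have := pv_measure_lt g D hN; omega)

lemma pv_FD_nil (g : List (String × List String)) : pvFD g [] = g := by
  simp [pvFD]

-- ===== VERDICT (by name: the statement is the Claim_ definition above) =====
theorem removeDeadEnds_spec : Claim_equal_removeDeadEnds := by
  intro g _ hpre
  show removeDeadEnds g = removeDeadEnds_alt g
  unfold removeDeadEnds removeDeadEnds_alt
  have h0 : ((g.map Prod.fst).filter (fun x => !List.contains ([] : List String) x)).length
      < g.length + 1 := by
    simp
  have hmk : PySem.Dict.mk g = PySem.Dict.mk (pvFD g []) := by rw [pv_FD_nil]
  rw [hmk, pv_main g hpre (g.length + 1) [] h0]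
  rfl
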